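-- pv_equiv track=rewrite | github.com/OriginHub-pvt/originhub-data-engineering | dags/src/xml_to_json.py | _first_url_from_links
-- ===== SOURCE A (Python) =====
-- from typing import Any, Dict, List, Optional
--
-- def _first_url_from_links(links: Any) -> Optional[str]:
--     if not links:
--         return None
--     for l in links:
--         if (l.get("rel") or "alternate") == "alternate" and l.get("href"):
--             return l["href"].strip()
--     for l in links:
--         if l.get("href"):
--             return l["href"].strip()
--     return None
-- ===== SOURCE B (Python) =====
-- from typing import Any, Optional
--
-- def _first_url_from_links(links: Any) -> Optional[str]:
--     if not links:
--         return None
--     fallback = None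
--     for l in links:
--         href = l.get("href")
--         if href:
--             if (l.get("rel") or "alternate") == "alternate":
--                 return href.strip()
--             if fallback is None:
--                 fallback = href.strip()
--     return fallback
-- ===== Notes on version B (the rewrite author's own statement) =====
-- stated objective: alternative
-- what changed: Replaces A's two sequential scans (first for alternate links, then for any link) by a single pass that returns an alternate href immediately and carries the first non-alternate href as a fallback accumulator returned after the loop.
import Mathlib
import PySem

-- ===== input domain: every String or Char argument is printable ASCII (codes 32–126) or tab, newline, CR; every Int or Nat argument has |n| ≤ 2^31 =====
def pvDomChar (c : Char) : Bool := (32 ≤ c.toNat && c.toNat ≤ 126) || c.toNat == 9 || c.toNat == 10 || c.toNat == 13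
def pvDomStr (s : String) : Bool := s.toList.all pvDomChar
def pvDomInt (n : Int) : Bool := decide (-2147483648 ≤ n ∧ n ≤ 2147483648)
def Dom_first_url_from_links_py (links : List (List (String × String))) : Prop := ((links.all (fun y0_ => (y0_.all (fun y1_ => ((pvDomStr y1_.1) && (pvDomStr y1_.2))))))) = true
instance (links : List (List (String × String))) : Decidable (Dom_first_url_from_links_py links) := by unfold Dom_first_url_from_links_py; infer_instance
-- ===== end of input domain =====

-- B folds A's two sequential scans into one pass carrying a fallback candidate; same O(n) cost, different decomposition.

-- ===== PORT A =====
-- l.get("href") truthy ⇔ key present with non-empty value; modelled as getD "" ≠ ""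
def pvHref (l : List (String × String)) : String :=
  ((PySem.Dict.mk l).get? "href").getD ""

-- (l.get("rel") or "alternate"): missing key or empty string both give "alternate"
def pvRelOr (l : List (String × String)) : String :=
  match (PySem.Dict.mk l).get? "rel" with
  | some r => if r = "" then "alternate" else r
  | none => "alternate"

-- first for-loop of A
def pvALoop1 : List (List (String × String)) → Option String
  | [] => none
  | l :: rest =>
    if pvRelOr l = "alternate" ∧ pvHref l ≠ "" then
      some (PySem.Str.strip (pvHref l))
    else pvALoop1 rest

-- second for-loop of A
def pvALoop2 : List (List (String × String)) → Option String
  | [] => none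
  | l :: rest =>
    if pvHref l ≠ "" then some (PySem.Str.strip (pvHref l))
    else pvALoop2 rest

def first_url_from_links_py (links : List (List (String × String))) : Option String :=
  if links = [] then none
  else
    match pvALoop1 links with
    | some s => some s
    | none => pvALoop2 links

-- ===== PORT B =====
-- single pass with fallback accumulator (B's loop)
def pvBLoop : List (List (String × String)) → Option String → Option String
  | [], fb => fb
  | l :: rest, fb =>
    if pvHref l ≠ "" then
      if pvRelOr l = "alternate" then some (PySem.Str.strip (pvHref l))
      else pvBLoop rest (if fb = none then some (PySem.Str.strip (pvHref l)) else fb)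
    else pvBLoop rest fb

def first_url_from_links_py_alt (links : List (List (String × String))) : Option String :=
  if links = [] then none
  else pvBLoop links none

-- ===== PRECONDITION & SPEC =====
def Spec_first_url_from_links_py (links : List (List (String × String))) (out : Option String) : Prop := out = first_url_from_links_py_alt links
instance (links : List (List (String × String))) (out : Option String) : Decidable (Spec_first_url_from_links_py links out) := by unfold Spec_first_url_from_links_py; infer_instance

-- ===== CLAIM (what is proved, stated in full; the proofs are below) =====
def Claim_equal_first_url_from_links_py : Prop := ∀ (links : List (List (String × String))), Dom_first_url_from_links_py links → Spec_first_url_from_links_py links (first_url_from_links_py links)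

-- ===== LEMMAS AND PROOFS =====
-- B's single pass equals: first-alternate result, else fallback, else first-any-href result
theorem pvBLoop_eq (links : List (List (String × String))) :
    ∀ fb : Option String,
      pvBLoop links fb =
        match pvALoop1 links with
        | some s => some s
        | none => fb.or (pvALoop2 links) := by
  induction links with
  | nil => intro fb; cases fb <;> simp [pvBLoop, pvALoop1, pvALoop2, Option.or]
  | cons l rest ih =>
    intro fb
    by_cases hh : pvHref l ≠ ""
    · by_cases hr : pvRelOr l = "alternate"
      · simp [pvBLoop, pvALoop1, hh, hr]
      · simp only [pvBLoop, pvALoop1, pvALoop2, hh, hr, ne_eq, not_false_eq_true,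
          if_true, if_false, and_true]
        rw [ih]
        cases fb <;> cases h1 : pvALoop1 rest <;> simp [Option.or]
    · simp only [ne_eq, not_not] at hh
      simp [pvBLoop, pvALoop1, pvALoop2, hh, ih]

-- ===== VERDICT (by name: the statement is the Claim_ definition above) =====
theorem first_url_from_links_py_spec : Claim_equal_first_url_from_links_py := by
  intro links _
  unfold Spec_first_url_from_links_py first_url_from_links_py first_url_from_links_py_alt
  by_cases h : links = []
  · simp [h]
  · simp only [h, if_false]
    rw [pvBLoop_eq]
    cases pvALoop1 links <;> simp [Option.or]
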